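-- pv_equiv track=rewrite | github.com/zedarvates/StoryCore-Engine | src/memory_system/discussion_manager.py | extract_key_information
-- ===== SOURCE A (Python) =====
-- from typing import List, Optional, Dict, Any
--
-- def extract_key_information(discussion_text: str) -> Dict[str, Any]:
--     """
--     Extract decisions, action items, entities, constraints from discussion.
--
--     Args:
--         discussion_text: Raw discussion text
--
--     Returns:
--         Dictionary with extracted key information
--
--     Validates: Requirement 4.4
--     """
--     key_info = {
--         "decisions": [],
--         "action_items": [],
--         "entities": [],
--         "constraints": [],
--         "objectives": [],
--     }
--
--     lines = discussion_text.split('\n')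
--
--     for line in lines:
--         line_lower = line.lower().strip()
--
--         # Simple keyword-based extraction (can be enhanced with LLM)
--         if any(keyword in line_lower for keyword in ['decision:', 'decided:', 'we decided', 'agreed to']):
--             decision = line.split(':', 1)[-1].strip() if ':' in line else line
--             if decision:
--                 key_info["decisions"].append(decision)
--
--         if any(keyword in line_lower for keyword in ['action:', 'will:', 'todo:', 'to do', 'action item']):
--             action = line.split(':', 1)[-1].strip() if ':' in line else line
--             if action:
--                 key_info["action_items"].append(action)
--
--         if any(keyword in line_lower for keyword in ['constraint:', 'must', 'required to', 'cannot', 'must not']):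
--             constraint = line.split(':', 1)[-1].strip() if ':' in line else line
--             if constraint:
--                 key_info["constraints"].append(constraint)
--
--         if any(keyword in line_lower for keyword in ['objective:', 'goal:', 'aim:']):
--             objective = line.split(':', 1)[-1].strip() if ':' in line else line
--             if objective:
--                 key_info["objectives"].append(objective)
--
--     return key_info
-- ===== SOURCE B (Python) =====
-- def extract_key_information(discussion_text: str):
--     """Same extraction, decomposed: one independent keyword-filter pass per category."""
--     lines = discussion_text.split('\n')
--
--     def entry(line):
--         return line.split(':', 1)[-1].strip() if ':' in line else line
--
--     def matches(line, keywords):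
--         low = line.lower().strip()
--         return any(kw in low for kw in keywords)
--
--     def extract(keywords):
--         return [e for e in (entry(l) for l in lines if matches(l, keywords)) if e]
--
--     return {
--         "decisions": extract(['decision:', 'decided:', 'we decided', 'agreed to']),
--         "action_items": extract(['action:', 'will:', 'todo:', 'to do', 'action item']),
--         "entities": [],
--         "constraints": extract(['constraint:', 'must', 'required to', 'cannot', 'must not']),
--         "objectives": extract(['objective:', 'goal:', 'aim:']),
--     }
-- ===== Notes on version B (the rewrite author's own statement) =====
-- stated objective: simpler
-- what changed: Replaces the single line loop that threads four accumulator lists with one generic keyword-filter pass (filter lines by keyword match, map to the extracted entry, drop empties) invoked independently per category.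
import Mathlib
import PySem

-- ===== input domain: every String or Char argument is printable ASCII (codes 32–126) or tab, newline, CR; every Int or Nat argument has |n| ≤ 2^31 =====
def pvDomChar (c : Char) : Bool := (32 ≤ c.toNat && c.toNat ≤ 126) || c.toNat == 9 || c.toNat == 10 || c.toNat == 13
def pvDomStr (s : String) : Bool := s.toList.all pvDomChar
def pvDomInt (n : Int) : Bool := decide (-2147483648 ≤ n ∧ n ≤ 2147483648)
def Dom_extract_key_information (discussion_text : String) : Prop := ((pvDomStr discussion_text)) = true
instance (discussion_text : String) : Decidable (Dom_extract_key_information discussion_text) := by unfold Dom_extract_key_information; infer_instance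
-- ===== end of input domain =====

-- B is the same extraction decomposed into four independent keyword-filter passes (objective: simpler).

-- keyword lists (shared literal constants of both Pythons)
def pvKwDecisions : List String := ["decision:", "decided:", "we decided", "agreed to"]
def pvKwActions : List String := ["action:", "will:", "todo:", "to do", "action item"]
def pvKwConstraints : List String := ["constraint:", "must", "required to", "cannot", "must not"]
def pvKwObjectives : List String := ["objective:", "goal:", "aim:"]

-- ===== PORT A =====
-- one pass over the lines, threading the four lists of key_info as the fold state
def pvStepA (st : List String × List String × List String × List String) (line : String) :
    List String × List String × List String × List String :=
  let (ds, acts, cs, os) := st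
  let lineLower := PySem.Str.strip (PySem.Str.lower line)
  let ds :=
    if pvKwDecisions.any (fun kw => PySem.Str.isIn kw lineLower) then
      let v := if PySem.Str.isIn ":" line then
          PySem.Str.strip ((PySem.List.pyGet? ((PySem.Str.splitMax? line ":" 1).getD []) (-1)).getD "")
        else line
      if v ≠ "" then ds ++ [v] else ds
    else ds
  let acts :=
    if pvKwActions.any (fun kw => PySem.Str.isIn kw lineLower) then
      let v := if PySem.Str.isIn ":" line then
          PySem.Str.strip ((PySem.List.pyGet? ((PySem.Str.splitMax? line ":" 1).getD []) (-1)).getD "")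
        else line
      if v ≠ "" then acts ++ [v] else acts
    else acts
  let cs :=
    if pvKwConstraints.any (fun kw => PySem.Str.isIn kw lineLower) then
      let v := if PySem.Str.isIn ":" line then
          PySem.Str.strip ((PySem.List.pyGet? ((PySem.Str.splitMax? line ":" 1).getD []) (-1)).getD "")
        else line
      if v ≠ "" then cs ++ [v] else cs
    else cs
  let os :=
    if pvKwObjectives.any (fun kw => PySem.Str.isIn kw lineLower) then
      let v := if PySem.Str.isIn ":" line then
          PySem.Str.strip ((PySem.List.pyGet? ((PySem.Str.splitMax? line ":" 1).getD []) (-1)).getD "")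
        else line
      if v ≠ "" then os ++ [v] else os
    else os
  (ds, acts, cs, os)

def extract_key_information (discussion_text : String) : List (String × List String) :=
  let lines := (PySem.Str.split? discussion_text "\n").getD []
  let st := lines.foldl pvStepA ([], [], [], [])
  [("decisions", st.1), ("action_items", st.2.1), ("entities", []),
   ("constraints", st.2.2.1), ("objectives", st.2.2.2)]

-- ===== PORT B =====
-- Source B's helper entry(line): the text after the first ':' (stripped), else the raw line
def pvEntry (line : String) : String :=
  if PySem.Str.isIn ":" line then
    PySem.Str.strip ((PySem.List.pyGet? ((PySem.Str.splitMax? line ":" 1).getD []) (-1)).getD "")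
  else line

-- Source B's helper matches(line, keywords)
def pvMatches (line : String) (keywords : List String) : Bool :=
  keywords.any (fun kw => PySem.Str.isIn kw (PySem.Str.strip (PySem.Str.lower line)))

-- Source B's extract(keywords): filter matching lines, map to entry, drop empty entries
def pvExtract (lines : List String) (keywords : List String) : List String :=
  (((lines.filter (fun l => pvMatches l keywords)).map pvEntry).filter (fun e => e ≠ ""))

def extract_key_information_alt (discussion_text : String) : List (String × List String) :=
  let lines := (PySem.Str.split? discussion_text "\n").getD []
  [("decisions", pvExtract lines pvKwDecisions),
   ("action_items", pvExtract lines pvKwActions),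
   ("entities", []),
   ("constraints", pvExtract lines pvKwConstraints),
   ("objectives", pvExtract lines pvKwObjectives)]

-- ===== PRECONDITION & SPEC =====
def Spec_extract_key_information (discussion_text : String) (out : List (String × List String)) : Prop := out = extract_key_information_alt discussion_text
instance (discussion_text : String) (out : List (String × List String)) : Decidable (Spec_extract_key_information discussion_text out) := by unfold Spec_extract_key_information; infer_instance

-- ===== CLAIM (what is proved, stated in full; the proofs are below) =====
def Claim_equal_extract_key_information : Prop := ∀ (discussion_text : String), Dom_extract_key_information discussion_text → Spec_extract_key_information discussion_text (extract_key_information discussion_text)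

-- ===== LEMMAS AND PROOFS =====

-- what one line contributes to a category
def pvCondList (l : String) (kws : List String) : List String :=
  if pvMatches l kws then (if pvEntry l ≠ "" then [pvEntry l] else []) else []

theorem pvExtract_nil (kws : List String) : pvExtract [] kws = [] := rfl

theorem pvExtract_cons (l : String) (rest : List String) (kws : List String) :
    pvExtract (l :: rest) kws = pvCondList l kws ++ pvExtract rest kws := by
  simp only [pvExtract, pvCondList, List.filter_cons]
  by_cases h : pvMatches l kws <;> simp [h, List.filter_cons] <;> split_ifs <;> simp_all

theorem pvStepA_eq (ds acts cs os : List String) (l : String) :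
    pvStepA (ds, acts, cs, os) l =
      (ds ++ pvCondList l pvKwDecisions, acts ++ pvCondList l pvKwActions,
       cs ++ pvCondList l pvKwConstraints, os ++ pvCondList l pvKwObjectives) := by
  simp only [pvStepA, pvCondList, pvMatches, pvEntry]
  split_ifs <;> simp_all

theorem pvFoldA_eq (lines : List String) (ds acts cs os : List String) :
    lines.foldl pvStepA (ds, acts, cs, os) =
      (ds ++ pvExtract lines pvKwDecisions, acts ++ pvExtract lines pvKwActions,
       cs ++ pvExtract lines pvKwConstraints, os ++ pvExtract lines pvKwObjectives) := by
  induction lines generalizing ds acts cs os with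
  | nil => simp [pvExtract_nil]
  | cons l rest ih =>
      rw [List.foldl_cons, pvStepA_eq, ih]
      simp [pvExtract_cons, List.append_assoc]

-- ===== VERDICT (by name: the statement is the Claim_ definition above) =====
theorem extract_key_information_spec : Claim_equal_extract_key_information := by
  intro t _
  unfold Spec_extract_key_information extract_key_information extract_key_information_alt
  simp only [pvFoldA_eq, List.nil_append]
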